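-- pv_equiv track=rewrite | github.com/arcee-ai/mergekit | mergekit/scripts/fill_missing_params.py | find_common_ordered_names
-- ===== SOURCE A (Python) =====
-- from typing import List, Optional, Tuple
--
-- def find_common_ordered_names(
--     param_names: List[List[str]], prefixes: List[str]
-- ) -> List[str]:
--     """Identify and return common parameter names across all models, ensuring correct order. Also account for prefix."""
--     common_names = set(param_names[0])
--     for i in range(1, len(param_names)):
--         prefix = f"{prefixes[i]}." if prefixes[i] else ""
--         common_names.intersection_update({prefix + name for name in param_names[i]})
--     return [name for name in param_names[0] if name in common_names]
-- ===== SOURCE B (Python) =====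
-- def find_common_ordered_names(param_names, prefixes):
--     """Identify and return common parameter names across all models, ensuring correct order. Also account for prefix."""
--     need = len(param_names) - 1
--     count = {}
--     for i in range(1, len(param_names)):
--         prefix = f"{prefixes[i]}." if prefixes[i] else ""
--         for name in set(param_names[i]):
--             key = prefix + name
--             count[key] = count.get(key, 0) + 1
--     return [name for name in param_names[0] if count.get(name, 0) == need]
-- ===== Notes on version B (the rewrite author's own statement) =====
-- stated objective: alternative
-- what changed: Replaces iterated set intersection with a hash counter: B counts, per prefixed name, in how many of the other models' (deduplicated) name lists it occurs, then keeps a first-list name iff its count equals the number of other models; no intersection set is ever built.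
-- outside the precondition, e.g. on find_common_ordered_names([], []): A raises IndexError, B raises IndexError; on find_common_ordered_names([['a'], ['a']], ['']): A raises IndexError, B raises IndexError
import Mathlib
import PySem

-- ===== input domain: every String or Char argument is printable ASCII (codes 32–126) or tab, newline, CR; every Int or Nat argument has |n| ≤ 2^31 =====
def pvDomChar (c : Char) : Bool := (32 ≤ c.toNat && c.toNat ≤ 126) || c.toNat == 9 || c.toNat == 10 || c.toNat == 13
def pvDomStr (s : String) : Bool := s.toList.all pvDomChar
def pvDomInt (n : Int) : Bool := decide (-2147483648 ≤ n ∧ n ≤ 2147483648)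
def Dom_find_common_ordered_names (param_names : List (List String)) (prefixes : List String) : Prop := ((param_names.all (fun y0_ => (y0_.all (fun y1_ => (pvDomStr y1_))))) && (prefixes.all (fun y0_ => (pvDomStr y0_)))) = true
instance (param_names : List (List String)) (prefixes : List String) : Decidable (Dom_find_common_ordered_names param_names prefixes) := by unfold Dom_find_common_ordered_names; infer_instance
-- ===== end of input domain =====

-- B replaces A's iterated set intersection by a hash counter (occurrences per prefixed
-- name across the other models' deduplicated lists) and keeps a first-list name iff its
-- count equals the number of other models (objective: alternative).

-- ===== PORT A =====
def find_common_ordered_names (param_names : List (List String)) (prefixes : List String) : List String :=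
  let first := (PySem.List.pyGet? param_names 0).getD []
  let common_names : PySem.Set String := PySem.Set.ofList first
  let common_names :=
    (PySem.List.pyRange 1 param_names.length 1).foldl
      (fun cn i =>
        let p := (PySem.List.pyGet? prefixes i).getD ""
        let pfx := if p ≠ "" then p ++ "." else ""
        PySem.Set.inter cn
          (PySem.Set.ofList (((PySem.List.pyGet? param_names i).getD []).map (fun name => pfx ++ name))))
      common_names
  first.filter (fun name => PySem.Set.contains common_names name)

-- ===== PORT B =====
def find_common_ordered_names_alt (param_names : List (List String)) (prefixes : List String) : List String :=
  let need : Int := (param_names.length : Int) - 1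
  let count : PySem.Dict String Int :=
    (PySem.List.pyRange 1 param_names.length 1).foldl
      (fun d i =>
        let p := (PySem.List.pyGet? prefixes i).getD ""
        let pfx := if p ≠ "" then p ++ "." else ""
        -- 'for name in set(param_names[i])': the counts do not depend on the set's iteration order
        (PySem.Set.ofList ((PySem.List.pyGet? param_names i).getD [])).foldl
          (fun d name => d.insert (pfx ++ name) (d.getD (pfx ++ name) 0 + 1)) d)
      PySem.Dict.empty
  ((PySem.List.pyGet? param_names 0).getD []).filter
    (fun name => PySem.Dict.getD count name 0 == need)

-- ===== PRECONDITION & SPEC =====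
-- Pre_ excludes exactly the inputs where Python A raises IndexError: empty param_names
-- (param_names[0]), or 2+ models with prefixes shorter than param_names (prefixes[i]).
def Pre_find_common_ordered_names (param_names : List (List String)) (prefixes : List String) : Prop :=
  param_names.length ≠ 0 ∧ (param_names.length = 1 ∨ param_names.length ≤ prefixes.length)
instance (param_names : List (List String)) (prefixes : List String) : Decidable (Pre_find_common_ordered_names param_names prefixes) := by unfold Pre_find_common_ordered_names; infer_instance

def pvWitness_find_common_ordered_names : List (List String) × List String :=
  ([["a", "b"], ["p.a"]], ["", "p"])

def Spec_find_common_ordered_names (param_names : List (List String)) (prefixes : List String) (out : List String) : Prop := out = find_common_ordered_names_alt param_names prefixes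
instance (param_names : List (List String)) (prefixes : List String) (out : List String) : Decidable (Spec_find_common_ordered_names param_names prefixes out) := by unfold Spec_find_common_ordered_names; infer_instance

-- ===== CLAIM (what is proved, stated in full; the proofs are below) =====
def Claim_equal_find_common_ordered_names : Prop := ∀ (param_names : List (List String)) (prefixes : List String), Dom_find_common_ordered_names param_names prefixes → Pre_find_common_ordered_names param_names prefixes → Spec_find_common_ordered_names param_names prefixes (find_common_ordered_names param_names prefixes)

-- ===== LEMMAS AND PROOFS =====

-- prefixing is injective, so the mapped deduplicated list has no duplicates
theorem pv_append_left_cancel (p a b : String) (h : p ++ a = p ++ b) : a = b := by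
  have h2 : (p ++ a).toList = (p ++ b).toList := by rw [h]
  simp only [String.toList_append] at h2
  exact String.toList_injective (List.append_cancel_left h2)

-- membership in A's pass-i set, as a Bool-valued predicate shared by both sides
theorem pv_contains_inter {α : Type} [BEq α] [LawfulBEq α] (c t : PySem.Set α) (n : α) :
    PySem.Set.contains (PySem.Set.inter c t) n = (PySem.Set.contains c n && PySem.Set.contains t n) := by
  rw [Bool.eq_iff_iff]
  simp [PySem.Set.mem_inter]

-- A's folded intersection tests membership in every pass's set
theorem pv_contains_foldl_inter (L : List Int) (s : Int → PySem.Set String)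
    (cn : PySem.Set String) (n : String) :
    PySem.Set.contains (L.foldl (fun c i => PySem.Set.inter c (s i)) cn) n
      = (PySem.Set.contains cn n && L.all (fun i => PySem.Set.contains (s i) n)) := by
  induction L generalizing cn with
  | nil => simp
  | cons i L ih =>
      simp only [List.foldl_cons, List.all_cons, ih, pv_contains_inter, Bool.and_assoc]

-- B's counter after all passes: the count of n is the number of passes whose
-- (deduplicated, prefixed) name list contains n
theorem pv_getD_fold (L : List Int) (key : Int → String → String) (xs : Int → List String)
    (hnd : ∀ i, (xs i).Nodup) (hinj : ∀ i a b, key i a = key i b → a = b)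
    (d : PySem.Dict String Int) (n : String) :
    (L.foldl (fun d i => (xs i).foldl
        (fun d a => d.insert (key i a) (d.getD (key i a) 0 + 1)) d) d).getD n 0
      = d.getD n 0 + (L.countP (fun i => decide (n ∈ (xs i).map (key i))) : Int) := by
  induction L generalizing d with
  | nil => simp
  | cons i L ih =>
      simp only [List.foldl_cons, List.countP_cons]
      rw [ih]
      have hpass : ((xs i).foldl
          (fun d a => d.insert (key i a) (d.getD (key i a) 0 + 1)) d).getD n 0
          = d.getD n 0 + (((xs i).map (key i)).count n : Int) := by
        rw [← List.foldl_map (f := key i)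
          (g := fun (d : PySem.Dict String Int) (a : String) => d.insert a (d.getD a 0 + 1))]
        exact PySem.Dict.getD_foldl_insert_add_one ((xs i).map (key i)) d n
      rw [hpass]
      have hcnt : ((xs i).map (key i)).count n
          = if n ∈ (xs i).map (key i) then 1 else 0 := by
        by_cases hm : n ∈ (xs i).map (key i)
        · simp [hm, List.count_eq_one_of_mem ((hnd i).map (fun a b => hinj i a b)) hm]
        · simp [hm, List.count_eq_zero_of_not_mem hm]
      rw [hcnt]
      by_cases hm : n ∈ (xs i).map (key i) <;> simp [hm] <;> ring

-- a Boolean count-reaches-length test is the same as `all`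
theorem pv_countP_eq_length_iff (L : List Int) (p : Int → Bool) :
    ((L.countP p : Int) == (L.length : Int)) = L.all p := by
  rw [Bool.eq_iff_iff, beq_iff_eq, List.all_eq_true]
  constructor
  · intro h
    exact (List.countP_eq_length).mp (by exact_mod_cast h)
  · intro h
    exact_mod_cast (List.countP_eq_length).mpr h

-- ===== VERDICT (by name: the statement is the Claim_ definition above) =====
theorem find_common_ordered_names_spec : Claim_equal_find_common_ordered_names := by
  intro param_names prefixes _ hpre
  unfold Spec_find_common_ordered_names
  show find_common_ordered_names param_names prefixes = find_common_ordered_names_alt param_names prefixes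
  unfold find_common_ordered_names find_common_ordered_names_alt
  simp only []
  set first := (PySem.List.pyGet? param_names 0).getD [] with hfirst
  set L := PySem.List.pyRange 1 (param_names.length : Int) 1 with hL
  set names : Int → List String := fun i => (PySem.List.pyGet? param_names i).getD [] with hnames
  set pfx : Int → String := fun i =>
    if ((PySem.List.pyGet? prefixes i).getD "") ≠ ""
      then ((PySem.List.pyGet? prefixes i).getD "") ++ "." else "" with hpfx
  -- the common per-pass Boolean predicate
  apply List.filter_congr
  intro n hn
  -- A side
  rw [pv_contains_foldl_inter L
      (fun i => PySem.Set.ofList ((names i).map (fun name => pfx i ++ name)))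
      (PySem.Set.ofList first) n]
  have hcn : PySem.Set.contains (PySem.Set.ofList first) n = true := by
    rw [PySem.Set.contains_iff, PySem.Set.mem_ofList]; exact hn
  rw [hcn, Bool.true_and]
  -- B side
  rw [pv_getD_fold L (fun i name => pfx i ++ name) (fun i => PySem.Set.ofList (names i))
      (fun i => PySem.Set.nodup_ofList (names i))
      (fun i a b h => pv_append_left_cancel (pfx i) a b h)
      PySem.Dict.empty n]
  rw [PySem.Dict.getD_empty, zero_add]
  -- lengths: |L| = len(param_names) - 1 under Pre_
  have hlen : (L.length : Int) = (param_names.length : Int) - 1 := by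
    rw [hL, PySem.List.length_pyRange_one]
    have h1 : 1 ≤ param_names.length := Nat.one_le_iff_ne_zero.mpr hpre.1
    omega
  rw [← hlen]
  rw [pv_countP_eq_length_iff L
      (fun i => decide (n ∈ (PySem.Set.ofList (names i)).map (fun name => pfx i ++ name)))]
  -- the two Boolean predicates agree pass by pass
  have hpt : ∀ i : Int,
      PySem.Set.contains (PySem.Set.ofList ((names i).map (fun name => pfx i ++ name))) n
        = decide (n ∈ (PySem.Set.ofList (names i)).map (fun name => pfx i ++ name)) := by
    intro i
    rw [Bool.eq_iff_iff]
    simp [PySem.Set.mem_ofList]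
  simp only [hpt]
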